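-- pv_equiv track=rewrite | github.com/aleverrier/qtanner-search | src/qtanner/paper_extract.py | _apply_col_perm_to_bitrows
-- ===== SOURCE A (Python) =====
-- from typing import Dict, Iterable, List, Optional, Sequence, Tuple
--
-- def _apply_col_perm_to_bitrows(rows: Sequence[int], perm: Sequence[int]) -> List[int]:
--     out: List[int] = []
--     for row in rows:
--         new_row = 0
--         x = int(row)
--         while x:
--             lsb = x & -x
--             idx = lsb.bit_length() - 1
--             new_row |= 1 << int(perm[idx])
--             x -= lsb
--         out.append(new_row)
--     return out
-- ===== SOURCE B (Python) =====
-- def _permute_row(row, perm):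
--     new_row = 0
--     for i in range(row.bit_length()):
--         if (row >> i) & 1:
--             new_row |= 1 << perm[i]
--     return new_row
--
--
-- def _apply_col_perm_to_bitrows(rows, perm):
--     return [_permute_row(row, perm) for row in rows]
-- ===== Notes on version B (the rewrite author's own statement) =====
-- stated objective: alternative
-- what changed: Each row is rebuilt by a linear scan of all bit positions 0..bit_length-1 testing (row >> i) & 1, instead of A's extraction of only the set bits via the x & -x lowest-set-bit idiom with in-place bit clearing; the row list is a comprehension over a per-row helper instead of an append loop.
import Mathlib
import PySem

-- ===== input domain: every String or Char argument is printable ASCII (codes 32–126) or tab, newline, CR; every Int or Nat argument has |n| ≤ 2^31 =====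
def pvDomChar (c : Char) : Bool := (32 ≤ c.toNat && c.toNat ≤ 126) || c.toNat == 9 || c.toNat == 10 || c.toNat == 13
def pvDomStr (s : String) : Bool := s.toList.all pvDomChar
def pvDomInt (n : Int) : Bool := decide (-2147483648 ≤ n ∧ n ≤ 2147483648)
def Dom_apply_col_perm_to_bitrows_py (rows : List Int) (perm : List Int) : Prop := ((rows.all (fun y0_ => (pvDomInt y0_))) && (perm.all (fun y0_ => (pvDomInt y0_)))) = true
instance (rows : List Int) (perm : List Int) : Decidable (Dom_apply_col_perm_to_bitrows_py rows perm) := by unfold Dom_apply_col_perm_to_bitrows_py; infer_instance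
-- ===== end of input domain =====

-- B replaces A's lowest-set-bit extraction loop (x & -x, clear, repeat) by a linear scan of
-- all bit positions 0..bit_length-1; same return value on every input where A returns (Pre_).


-- ===== PORT A =====
-- Lowest-set-bit facts about n &&& -n (computed on Nat as n.ldiff (n-1)); the port's
-- termination proof cites this lemma, so it stays above the port.
theorem pvLowbit (n : Nat) (hn : n ≠ 0) :
    ∃ t, n.testBit t = true ∧ (∀ j, j < t → n.testBit j = false) ∧
      n.ldiff (n - 1) = 2 ^ t ∧
      (∀ j, (n - 2 ^ t).testBit j = (n.testBit j && !(j == t))) := by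
  obtain ⟨t, m, hm, rfl⟩ := Nat.exists_eq_two_pow_mul_odd hn
  obtain ⟨q, rfl⟩ := hm
  have hp : 0 < 2 ^ t := by positivity
  have hb : 2 ^ t < 2 ^ (t + 1) := by rw [pow_succ]; omega
  have hn' : 2 ^ t * (2 * q + 1) = 2 ^ (t + 1) * q + 2 ^ t := by ring
  have h1 : 2 ^ t * (2 * q + 1) - 1 = 2 ^ (t + 1) * q + (2 ^ t - 1) := by omega
  have hsub : 2 ^ t * (2 * q + 1) - 2 ^ t = 2 ^ (t + 1) * q + 0 := by omega
  have htn : ∀ j, (2 ^ t * (2 * q + 1)).testBit j =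
      if j < t + 1 then (2 ^ t).testBit j else q.testBit (j - (t + 1)) := by
    intro j; rw [hn']; exact Nat.testBit_two_pow_mul_add q hb j
  have htn1 : ∀ j, (2 ^ t * (2 * q + 1) - 1).testBit j =
      if j < t + 1 then (2 ^ t - 1).testBit j else q.testBit (j - (t + 1)) := by
    intro j; rw [h1]; exact Nat.testBit_two_pow_mul_add q (by omega) j
  have hts : ∀ j, (2 ^ t * (2 * q + 1) - 2 ^ t).testBit j =
      if j < t + 1 then (0 : Nat).testBit j else q.testBit (j - (t + 1)) := by
    intro j; rw [hsub]; exact Nat.testBit_two_pow_mul_add q (by omega) j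
  refine ⟨t, ?_, ?_, ?_, ?_⟩
  · rw [htn t]; simp [Nat.testBit_two_pow_self]
  · intro j hj; rw [htn j]
    rw [if_pos (by omega), Nat.testBit_two_pow_of_ne (by omega)]
  · apply Nat.eq_of_testBit_eq; intro j
    rw [Nat.testBit_ldiff, htn j, htn1 j]
    by_cases hj : j < t + 1
    · rw [if_pos hj, if_pos hj]
      by_cases hjt : j = t
      · subst hjt
        simp [Nat.testBit_two_pow_self, Nat.testBit_two_pow_sub_one]
      · rw [Nat.testBit_two_pow_of_ne (by omega)]
        simp
    · rw [if_neg hj, if_neg hj, Nat.testBit_two_pow_of_ne (by omega)]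
      simp
  · intro j; rw [hts j, htn j]
    by_cases hj : j < t + 1
    · rw [if_pos hj, if_pos hj, Nat.zero_testBit]
      by_cases hjt : j = t
      · subst hjt; simp
      · rw [Nat.testBit_two_pow_of_ne (Ne.symm hjt)]; simp
    · rw [if_neg hj, if_neg hj]
      have : (j == t) = false := by simp; omega
      rw [this]; simp

-- one row of A:  while x: lsb = x & -x; idx = lsb.bit_length()-1; new_row |= 1 << perm[idx]; x -= lsb
-- The guard `0 < x` ports Python's `while x:` exactly for x ≥ 0 (Pre_ gives 0 ≤ row); for x < 0
-- the Python loop never terminates, so those inputs are outside Pre_ (the port stops there).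
-- perm[idx] is pyGet? (none = IndexError, excluded by Pre_, defaulted); 1 << p with p < 0 raises
-- ValueError in Python, excluded by Pre_ (toNat is exact for p ≥ 0).
def pvARow (perm : List Int) (x : Int) (new_row : Int) : Int :=
  if hx : 0 < x then
    let lsb := Int.land x (-x)
    let idx : Int := (PySem.Int.bitLength lsb : Int) - 1
    let p := (PySem.List.pyGet? perm idx).getD 0
    pvARow perm (x - lsb) (Int.lor new_row ((1 : Int) <<< p.toNat))
  else new_row
termination_by x.toNat
decreasing_by
  · obtain ⟨m, rfl⟩ := Int.eq_ofNat_of_zero_le hx.le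
    have hm' : 0 < m := by exact_mod_cast hx
    have hm : m ≠ 0 := hm'.ne'
    obtain ⟨t, hbit, -, hld, -⟩ := pvLowbit m hm
    have hland : Int.land (↑m) (-(↑m : Int)) = ((m.ldiff (m - 1) : Nat) : Int) := by
      obtain ⟨k, rfl⟩ := Nat.exists_eq_succ_of_ne_zero hm
      rfl
    have h2 : 2 ^ t ≤ m := Nat.ge_two_pow_of_testBit hbit
    have hsub : (↑m : Int) - Int.land (↑m) (-(↑m : Int)) = ((m - 2 ^ t : Nat) : Int) := by
      rw [hland, hld, Int.ofNat_sub h2]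
    rw [hsub]
    simp only [Int.toNat_natCast]
    have : 0 < 2 ^ t := by positivity
    omega

def apply_col_perm_to_bitrows_py (rows : List Int) (perm : List Int) : List Int :=
  rows.foldl (fun out row => out ++ [pvARow perm row 0]) []

-- ===== PORT B =====
-- one row of B:  for i in range(row.bit_length()): if (row >> i) & 1: new_row |= 1 << perm[i]
-- (row >> i) is Int >>> Nat (i ≥ 0 inside the range, so toNat is exact); & 1 is Int.land.
def pvBRow (perm : List Int) (row : Int) : Int :=
  (PySem.List.pyRange 0 (PySem.Int.bitLength row : Int) 1).foldl
    (fun new_row i =>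
      if Int.land (row >>> i.toNat) 1 ≠ 0 then
        Int.lor new_row ((1 : Int) <<< ((PySem.List.pyGet? perm i).getD 0).toNat)
      else new_row) 0

def apply_col_perm_to_bitrows_py_alt (rows : List Int) (perm : List Int) : List Int :=
  rows.map (pvBRow perm)

-- ===== PRECONDITION & SPEC =====
-- Pre_ = exactly the inputs where Python A returns: every row nonnegative (a negative row makes
-- A's while-loop spin forever), and every set bit i of a row has i < len(perm) (else IndexError)
-- with perm[i] ≥ 0 (else 1 << perm[i] raises ValueError).
def Pre_apply_col_perm_to_bitrows_py (rows : List Int) (perm : List Int) : Prop :=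
  ∀ r ∈ rows, 0 ≤ r ∧
    ∀ i < PySem.Int.bitLength r, r.toNat.testBit i = true →
      i < perm.length ∧ 0 ≤ perm.getD i 0
instance (rows : List Int) (perm : List Int) : Decidable (Pre_apply_col_perm_to_bitrows_py rows perm) := by
  unfold Pre_apply_col_perm_to_bitrows_py; infer_instance

def pvWitness_apply_col_perm_to_bitrows_py : List Int × List Int := ([5, 2], [1, 0, 2])

def Spec_apply_col_perm_to_bitrows_py (rows : List Int) (perm : List Int) (out : List Int) : Prop := out = apply_col_perm_to_bitrows_py_alt rows perm
instance (rows : List Int) (perm : List Int) (out : List Int) : Decidable (Spec_apply_col_perm_to_bitrows_py rows perm out) := by unfold Spec_apply_col_perm_to_bitrows_py; infer_instance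

-- ===== CLAIM (what is proved, stated in full; the proofs are below) =====
def Claim_equal_apply_col_perm_to_bitrows_py : Prop := ∀ (rows : List Int) (perm : List Int), Dom_apply_col_perm_to_bitrows_py rows perm → Pre_apply_col_perm_to_bitrows_py rows perm → Spec_apply_col_perm_to_bitrows_py rows perm (apply_col_perm_to_bitrows_py rows perm)

-- ===== LEMMAS AND PROOFS =====

-- the ascending list of set-bit positions of n
def pvS (n : Nat) : List Nat :=
  (List.range (PySem.Int.bitLength ((n : Int)))).filter (fun i => n.testBit i)

-- the common per-bit accumulator step
def pvStep (perm : List Int) (a : Int) (i : Nat) : Int :=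
  Int.lor a ((1 : Int) <<< ((PySem.List.pyGet? perm ((i : Int))).getD 0).toNat)

theorem pvBitLen_le (m k : Nat) (h : m < 2 ^ k) : PySem.Int.bitLength ((m : Int)) ≤ k := by
  by_cases hm : m = 0
  · subst hm
    simp
  · by_contra hlt
    rw [not_le] at hlt
    have h2 := PySem.Int.two_pow_bitLength_le ((m : Int)) (by exact_mod_cast hm)
    rw [Int.natAbs_natCast] at h2
    have : 2 ^ k ≤ 2 ^ (PySem.Int.bitLength ((m : Int)) - 1) :=
      Nat.pow_le_pow_right (by norm_num) (by omega)
    omega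

theorem pvTestBit_high (m i : Nat) (h : PySem.Int.bitLength ((m : Int)) ≤ i) :
    m.testBit i = false := by
  have h1 := PySem.Int.lt_two_pow_bitLength ((m : Int))
  rw [Int.natAbs_natCast] at h1
  exact Nat.testBit_eq_false_of_lt
    (lt_of_lt_of_le h1 (Nat.pow_le_pow_right (by norm_num) h))

theorem pvBitLenPow (t : Nat) : PySem.Int.bitLength (((2 ^ t : Nat) : Int)) = t + 1 := by
  have hp : 0 < 2 ^ t := by positivity
  have h1 := PySem.Int.lt_two_pow_bitLength (((2 ^ t : Nat) : Int))
  have h2 := PySem.Int.two_pow_bitLength_le (((2 ^ t : Nat) : Int)) (by exact_mod_cast hp.ne')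
  rw [Int.natAbs_natCast] at h1 h2
  have ht : t < PySem.Int.bitLength (((2 ^ t : Nat) : Int)) := by
    by_contra hc
    have : 2 ^ PySem.Int.bitLength (((2 ^ t : Nat) : Int)) ≤ 2 ^ t :=
      Nat.pow_le_pow_right (by norm_num) (by omega)
    omega
  have hle : 2 ^ (PySem.Int.bitLength (((2 ^ t : Nat) : Int)) - 1) ≤ 2 ^ t := h2
  have : PySem.Int.bitLength (((2 ^ t : Nat) : Int)) - 1 ≤ t := by
    by_contra hc
    have : 2 ^ (t + 1) ≤ 2 ^ (PySem.Int.bitLength (((2 ^ t : Nat) : Int)) - 1) :=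
      Nat.pow_le_pow_right (by norm_num) (by omega)
    have h3 : 2 ^ t < 2 ^ (t + 1) := by rw [pow_succ]; omega
    omega
  omega

theorem pvS_ext (m k : Nat) (hk : PySem.Int.bitLength ((m : Int)) ≤ k) :
    (List.range k).filter (fun i => m.testBit i) = pvS m := by
  induction k with
  | zero =>
    have h0 : PySem.Int.bitLength ((m : Int)) = 0 := Nat.le_zero.mp hk
    unfold pvS; rw [h0]
  | succ k ih =>
    rcases Nat.lt_or_ge k (PySem.Int.bitLength ((m : Int))) with h' | h
    · have : PySem.Int.bitLength ((m : Int)) = k + 1 := by omega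
      unfold pvS; rw [this]
    · rw [List.range_succ, List.filter_append, ih h]
      have : m.testBit k = false := pvTestBit_high m k h
      simp [this]

theorem pvS_cons (n : Nat) (hn : n ≠ 0) :
    ∃ t, n.testBit t = true ∧ n.ldiff (n - 1) = 2 ^ t ∧
      pvS n = t :: pvS (n - 2 ^ t) := by
  obtain ⟨t, hbit, hlow, hld, hclear⟩ := pvLowbit n hn
  refine ⟨t, hbit, hld, ?_⟩
  have hp : 0 < 2 ^ t := by positivity
  have htL : t < PySem.Int.bitLength ((n : Int)) := by
    by_contra hc
    rw [pvTestBit_high n t (by omega)] at hbit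
    exact Bool.false_ne_true hbit
  have hnlt := PySem.Int.lt_two_pow_bitLength ((n : Int))
  rw [Int.natAbs_natCast] at hnlt
  have hL' : PySem.Int.bitLength (((n - 2 ^ t : Nat) : Int)) ≤ PySem.Int.bitLength ((n : Int)) :=
    pvBitLen_le _ _ (lt_of_le_of_lt (Nat.sub_le _ _) hnlt)
  have hrange : List.range (PySem.Int.bitLength ((n : Int)))
      = List.range (t + 1) ++ (List.range (PySem.Int.bitLength ((n : Int)) - (t + 1))).map ((t + 1) + ·) := by
    rw [← List.range_add]; congr 1; omega
  have hlow1 : (List.range (t + 1)).filter (fun i => n.testBit i) = [t] := by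
    rw [List.range_succ, List.filter_append]
    have h0 : (List.range t).filter (fun i => n.testBit i) = [] := by
      apply List.filter_eq_nil_iff.mpr
      intro a ha
      simp only [List.mem_range] at ha
      simp [hlow a ha]
    simp [h0, hbit]
  have hlow2 : (List.range (t + 1)).filter (fun i => (n - 2 ^ t).testBit i) = [] := by
    apply List.filter_eq_nil_iff.mpr
    intro a ha
    simp only [List.mem_range] at ha
    rw [hclear a]
    by_cases hat : a = t
    · subst hat; simp
    · simp [hlow a (by omega)]
  have hupper : ((List.range (PySem.Int.bitLength ((n : Int)) - (t + 1))).map ((t + 1) + ·)).filter (fun i => n.testBit i)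
      = ((List.range (PySem.Int.bitLength ((n : Int)) - (t + 1))).map ((t + 1) + ·)).filter (fun i => (n - 2 ^ t).testBit i) := by
    apply List.filter_congr
    intro x hx
    simp only [List.mem_map] at hx
    obtain ⟨j, -, rfl⟩ := hx
    rw [hclear (t + 1 + j)]
    have : ((t + 1 + j) == t) = false := by simp; omega
    rw [this]; simp
  have key : pvS n = t :: ((List.range (PySem.Int.bitLength ((n : Int)))).filter (fun i => (n - 2 ^ t).testBit i)) := by
    unfold pvS
    rw [hrange, List.filter_append, List.filter_append, hlow1, hlow2, hupper]
    simp
  rw [key, pvS_ext (n - 2 ^ t) _ hL']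

theorem pvARow_eq (perm : List Int) (n : Nat) (acc : Int) :
    pvARow perm ((n : Int)) acc = (pvS n).foldl (pvStep perm) acc := by
  induction n using Nat.strong_induction_on generalizing acc with
  | _ n ih =>
    by_cases hn : n = 0
    · subst hn
      rw [pvARow]
      have h0 : PySem.Int.bitLength ((0 : Nat) : Int) = 0 := by decide
      simp [pvS]
    · obtain ⟨t, hbit, hld, hS⟩ := pvS_cons n hn
      have hp : 0 < 2 ^ t := by positivity
      have h2 : 2 ^ t ≤ n := Nat.ge_two_pow_of_testBit hbit
      have hpos : (0 : Int) < (n : Int) := by exact_mod_cast Nat.pos_of_ne_zero hn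
      rw [pvARow, dif_pos hpos]
      have hland : Int.land ((n : Int)) (-((n : Int))) = ((n.ldiff (n - 1) : Nat) : Int) := by
        obtain ⟨k, rfl⟩ := Nat.exists_eq_succ_of_ne_zero hn
        rfl
      simp only [hland, hld, pvBitLenPow t]
      have hidx : (((t + 1 : Nat) : Int)) - 1 = ((t : Nat) : Int) := by push_cast; ring
      simp only [hidx]
      have hxl : ((n : Int)) - (((2 ^ t : Nat) : Int)) = (((n - 2 ^ t : Nat) : Int)) := by
        rw [Int.ofNat_sub h2]
      rw [hxl, ih (n - 2 ^ t) (by omega)]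
      rw [hS]
      rfl

theorem pvFoldlFilter (l : List Nat) (p : Nat → Bool) (g : Int → Nat → Int) (acc : Int) :
    l.foldl (fun a i => if p i then g a i else a) acc = (l.filter p).foldl g acc := by
  induction l generalizing acc with
  | nil => rfl
  | cons x xs ih =>
    by_cases hx : p x
    · simp [hx, ih]
    · simp [hx, ih]

theorem pvBRow_eq (perm : List Int) (n : Nat) :
    pvBRow perm ((n : Int)) = (pvS n).foldl (pvStep perm) 0 := by
  have hTest : ∀ k : Nat, (Int.land ((n : Int) >>> ((k : Nat) : Int)) 1 ≠ 0) ↔ n.testBit k = true := by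
    intro k
    have h1 : Int.land ((n : Int) >>> ((k : Nat) : Int)) 1 = ((n >>> k &&& 1 : Nat) : Int) := by
      rw [Int.shiftRight_natCast]
      rfl
    rw [h1, Nat.testBit_eq_decide_div_mod_eq, Nat.and_one_is_mod, Nat.shiftRight_eq_div_pow]
    simp only [ne_eq, Int.natCast_eq_zero, decide_eq_true_eq]
    omega
  unfold pvBRow
  rw [PySem.List.pyRange_one]
  simp only [sub_zero, Int.toNat_natCast, zero_add, List.foldl_map]
  rw [PySem.List.foldl_congr_mem _ _
        (fun (a : Int) (k : Nat) => if n.testBit k then pvStep perm a k else a) _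
        (by
          intro a k _
          by_cases hb : n.testBit k
          · rw [if_pos ((hTest k).mpr hb)]; simp [pvStep, hb]
          · rw [if_neg (fun hc => hb ((hTest k).mp hc))]; simp [hb])]
  rw [pvFoldlFilter]
  rfl

-- ===== VERDICT (by name: the statement is the Claim_ definition above) =====
theorem apply_col_perm_to_bitrows_py_spec : Claim_equal_apply_col_perm_to_bitrows_py := by
  intro rows perm _ hpre
  unfold Spec_apply_col_perm_to_bitrows_py
  unfold apply_col_perm_to_bitrows_py apply_col_perm_to_bitrows_py_alt
  rw [PySem.List.foldl_append_singleton_eq_map]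
  apply List.map_congr_left
  intro r hr
  obtain ⟨hr0, -⟩ := hpre r hr
  obtain ⟨m, rfl⟩ := Int.eq_ofNat_of_zero_le hr0
  rw [pvARow_eq, pvBRow_eq]
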